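-- pv_equiv track=rewrite | github.com/snowflakedb/snowflake-sqlalchemy | src/snowflake/sqlalchemy/parser/custom_type_parser.py | tokenize_parameters
-- ===== SOURCE A (Python) =====
-- def tokenize_parameters(text: str, character_for_strip=",") -> list:
--     """
--     Extracts parameters from a comma-separated string, handling parentheses.
--
--     :param text: A string with comma-separated parameters, which may include parentheses.
--
--     :param character_for_strip: A character to strip the text.
--
--     :return: A list of parameters as strings.
--
--     :example:
--         For input `"a, (b, c), d"`, the output is `['a', '(b, c)', 'd']`.
--     """
--     output_parameters = []
--     parameter = ""
--     open_parenthesis = 0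
--     for c in text:
--
--         if c == "(":
--             open_parenthesis += 1
--         elif c == ")":
--             open_parenthesis -= 1
--
--         if open_parenthesis > 0 or c != character_for_strip:
--             parameter += c
--         elif c == character_for_strip:
--             output_parameters.append(parameter.strip(" "))
--             parameter = ""
--     if parameter != "":
--         output_parameters.append(parameter.strip(" "))
--     return output_parameters
-- ===== SOURCE B (Python) =====
-- def tokenize_parameters(text: str, character_for_strip=",") -> list:
--     """Split text at top-level occurrences of character_for_strip by locating
--     the next separator and slicing, instead of accumulating char by char."""
--     output_parameters = []
--     rest = text
--     depth = 0
--     while True: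
--         cut = -1
--         for i, c in enumerate(rest):
--             if c == "(":
--                 depth += 1
--             elif c == ")":
--                 depth -= 1
--             if depth <= 0 and c == character_for_strip:
--                 cut = i
--                 break
--         if cut == -1:
--             if rest != "":
--                 output_parameters.append(rest.strip(" "))
--             return output_parameters
--         output_parameters.append(rest[:cut].strip(" "))
--         rest = rest[cut + 1:]
-- ===== Notes on version B (the rewrite author's own statement) =====
-- stated objective: alternative
-- what changed: B replaces A's char-by-char token accumulator with a find-next-separator-and-slice loop: an inner scan locates the next top-level separator index, the token is taken as a slice of the remaining text, and the outer loop recurses on the suffix.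
import Mathlib
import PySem

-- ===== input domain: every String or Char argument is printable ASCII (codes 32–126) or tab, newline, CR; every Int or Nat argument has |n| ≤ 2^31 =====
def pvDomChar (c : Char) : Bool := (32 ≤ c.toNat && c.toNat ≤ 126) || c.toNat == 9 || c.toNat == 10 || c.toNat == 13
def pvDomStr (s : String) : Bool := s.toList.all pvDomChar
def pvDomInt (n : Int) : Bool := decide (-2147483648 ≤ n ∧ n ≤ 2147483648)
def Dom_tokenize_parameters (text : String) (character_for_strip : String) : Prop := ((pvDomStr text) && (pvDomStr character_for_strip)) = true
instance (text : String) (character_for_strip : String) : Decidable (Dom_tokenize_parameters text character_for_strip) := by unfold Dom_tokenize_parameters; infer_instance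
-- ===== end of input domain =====

-- B replaces A's char-by-char accumulator with a find-next-top-level-separator-and-slice loop (alternative decomposition, same cost).


-- ===== PORT A =====
-- state: (output_parameters, parameter, open_parenthesis); one foldl over the characters, as in A
def tokApStep (strip : String) (st : List String × List Char × Int) (c : Char) :
    List String × List Char × Int :=
  let d := if c = '(' then st.2.2 + 1 else if c = ')' then st.2.2 - 1 else st.2.2
  if 0 < d ∨ ¬ strip.toList = [c] then (st.1, st.2.1 ++ [c], d)
  else if strip.toList = [c] then
    (st.1 ++ [String.ofList (PySem.Chars.stripChars st.2.1 [' '])], [], d)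
  else (st.1, st.2.1, d)

def tokenize_parameters (text : String) (character_for_strip : String) : List String :=
  let st := text.toList.foldl (tokApStep character_for_strip) ([], [], 0)
  if st.2.1 ≠ [] then st.1 ++ [String.ofList (PySem.Chars.stripChars st.2.1 [' '])] else st.1

-- ===== PORT B =====
-- inner scan of B: first index (and depth there) of a top-level separator, none if absent
def tokFind (strip : String) : List Char → Int → Option (Nat × Int)
  | [], _ => none
  | c :: cs, d =>
    let d' := if c = '(' then d + 1 else if c = ')' then d - 1 else d
    if d' ≤ 0 ∧ strip.toList = [c] then some (0, d')
    else (tokFind strip cs d').map (fun p => (p.1 + 1, p.2))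

theorem tokFind_nil (strip : String) (d : Int) : tokFind strip [] d = none := rfl

-- outer loop of B: slice off the token before the cut, continue on the suffix
def tokLoop (strip : String) (rest : List Char) (d : Int) : List String :=
  match h : tokFind strip rest d with
  | none => if rest ≠ [] then [String.ofList (PySem.Chars.stripChars rest [' '])] else []
  | some (i, d') =>
      String.ofList (PySem.Chars.stripChars (rest.take i) [' ']) ::
        tokLoop strip (rest.drop (i + 1)) d'
termination_by rest.length
decreasing_by
  cases rest with
  | nil => simp [tokFind_nil] at h
  | cons a as => simp [List.length_drop]

def tokenize_parameters_alt (text : String) (character_for_strip : String) : List String :=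
  tokLoop character_for_strip text.toList 0

-- ===== PRECONDITION & SPEC =====
def Spec_tokenize_parameters (text : String) (character_for_strip : String) (out : List String) : Prop := out = tokenize_parameters_alt text character_for_strip
instance (text : String) (character_for_strip : String) (out : List String) : Decidable (Spec_tokenize_parameters text character_for_strip out) := by unfold Spec_tokenize_parameters; infer_instance

-- ===== CLAIM (what is proved, stated in full; the proofs are below) =====
def Claim_equal_tokenize_parameters : Prop := ∀ (text : String) (character_for_strip : String), Dom_tokenize_parameters text character_for_strip → Spec_tokenize_parameters text character_for_strip (tokenize_parameters text character_for_strip)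

-- ===== LEMMAS AND PROOFS =====

-- A's loop-plus-finish from an arbitrary state, as a function (proof helper)
def tokAfold (strip : String) (out : List String) (param : List Char) (d : Int)
    (cs : List Char) : List String :=
  let st := cs.foldl (tokApStep strip) (out, param, d)
  if st.2.1 ≠ [] then st.1 ++ [String.ofList (PySem.Chars.stripChars st.2.1 [' '])] else st.1

-- B's loop with the pending prefix `param` prepended to the first token (proof helper)
def tokLoopP (strip : String) (param : List Char) (cs : List Char) (d : Int) : List String :=
  match tokFind strip cs d with
  | none => if param ++ cs ≠ [] then [String.ofList (PySem.Chars.stripChars (param ++ cs) [' '])] else []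
  | some (i, d') =>
      String.ofList (PySem.Chars.stripChars (param ++ cs.take i) [' ']) ::
        tokLoop strip (cs.drop (i + 1)) d'

theorem tokLoopP_nil (strip : String) (cs : List Char) (d : Int) :
    tokLoopP strip [] cs d = tokLoop strip cs d := by
  rw [tokLoop]
  unfold tokLoopP
  cases h : tokFind strip cs d with
  | none => simp
  | some p => simp

theorem tokAfold_eq (strip : String) (cs : List Char) :
    ∀ (d : Int) (param : List Char) (out : List String),
      tokAfold strip out param d cs = out ++ tokLoopP strip param cs d := by
  induction cs with
  | nil =>
    intro d param out
    unfold tokAfold tokLoopP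
    simp [tokFind_nil]
    by_cases h : param = [] <;> simp [h]
  | cons c cs ih =>
    intro d param out
    unfold tokAfold tokLoopP
    simp only [List.foldl_cons]
    rw [show tokApStep strip (out, param, d) c =
        (let d' := if c = '(' then d + 1 else if c = ')' then d - 1 else d;
         if 0 < d' ∨ ¬ strip.toList = [c] then (out, param ++ [c], d')
         else if strip.toList = [c] then
           (out ++ [String.ofList (PySem.Chars.stripChars param [' '])], [], d')
         else (out, param, d')) from rfl]
    set d' := if c = '(' then d + 1 else if c = ')' then d - 1 else d with hd'
    by_cases hc : 0 < d' ∨ ¬ strip.toList = [c]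
    · -- A appends c to parameter; B's find skips c
      rw [if_pos hc]
      have hfind : tokFind strip (c :: cs) d =
          (tokFind strip cs d').map (fun p => (p.1 + 1, p.2)) := by
        rw [tokFind]
        have h2 : ¬ (d' ≤ 0 ∧ strip.toList = [c]) := by
          rcases hc with h | h
          · intro hand; omega
          · intro hand; exact h hand.2
        simp only [← hd', h2, if_neg, not_false_iff]
      have hih := ih d' (param ++ [c]) out
      unfold tokAfold at hih
      rw [hih, hfind]
      unfold tokLoopP
      cases hf : tokFind strip cs d' with
      | none => simp
      | some p =>
        obtain ⟨i, dc⟩ := p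
        simp [List.take_succ_cons, List.drop_succ_cons, List.append_assoc]
    · -- A emits the pending token; B's find reports a cut at index 0
      have hc' : d' ≤ 0 ∧ strip.toList = [c] := by
        push Not at hc; exact ⟨by omega, hc.2⟩
      rw [if_neg hc, if_pos hc'.2]
      have hfind : tokFind strip (c :: cs) d = some (0, d') := by
        rw [tokFind]; simp only [← hd', hc', and_self, if_pos]
      have hih := ih d' [] (out ++ [String.ofList (PySem.Chars.stripChars param [' '])])
      unfold tokAfold at hih
      rw [hih, hfind, tokLoopP_nil]
      simp

-- ===== VERDICT (by name: the statement is the Claim_ definition above) =====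
theorem tokenize_parameters_spec : Claim_equal_tokenize_parameters := by
  intro text strip _
  unfold Spec_tokenize_parameters tokenize_parameters tokenize_parameters_alt
  have h := tokAfold_eq strip text.toList 0 [] []
  unfold tokAfold at h
  simp only [List.nil_append] at h
  rw [h, tokLoopP_nil]
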